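-- pv_equiv track=rewrite | github.com/zedarvates/StoryCore-Engine | test_cleanup/analysis/coverage_analysis.py | calculate_unique_coverage
-- ===== SOURCE A (Python) =====
-- from typing import Dict, List, Set
--
-- def calculate_unique_coverage(
--     test_name: str,
--     test_coverage_map: Dict[str, Dict[str, Set[int]]]
-- ) -> int:
--     """
--     Calculate the number of unique lines covered only by this test.
--
--     Args:
--         test_name: Name of the test to analyze
--         test_coverage_map: Dictionary mapping test names to their coverage data
--
--     Returns:
--         Number of lines uniquely covered by this test
--
--     Requirements: 5.3
--     """
--     if test_name not in test_coverage_map: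
--         return 0
--
--     test_coverage = test_coverage_map[test_name]
--
--     # Get all lines covered by this test
--     test_lines = set()
--     for file_path, lines in test_coverage.items():
--         for line_num in lines:
--             test_lines.add(f"{file_path}:{line_num}")
--
--     # Get all lines covered by other tests
--     other_lines = set()
--     for other_test, coverage_data in test_coverage_map.items():
--         if other_test != test_name:
--             for file_path, lines in coverage_data.items():
--                 for line_num in lines:
--                     other_lines.add(f"{file_path}:{line_num}")
--
--     # Calculate unique coverage
--     unique_lines = test_lines - other_lines
--
--     return len(unique_lines)
-- ===== SOURCE B (Python) =====
-- def calculate_unique_coverage(test_name, test_coverage_map):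
--     if test_name not in test_coverage_map:
--         return 0
--     # frequency table: how many tests cover each file:line
--     counts = {}
--     for coverage_data in test_coverage_map.values():
--         for file_path, lines in coverage_data.items():
--             for line_num in lines:
--                 key = f"{file_path}:{line_num}"
--                 counts[key] = counts.get(key, 0) + 1
--     return sum(1
--                for file_path, lines in test_coverage_map[test_name].items()
--                for line_num in lines
--                if counts[f"{file_path}:{line_num}"] == 1)
-- ===== Notes on version B (the rewrite author's own statement) =====
-- stated objective: idiomatic
-- what changed: Replaces the two accumulated string sets and the set difference by a single coverage-frequency dict built in one pass over all tests, then counts this test's lines whose frequency is 1.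
import Mathlib
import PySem

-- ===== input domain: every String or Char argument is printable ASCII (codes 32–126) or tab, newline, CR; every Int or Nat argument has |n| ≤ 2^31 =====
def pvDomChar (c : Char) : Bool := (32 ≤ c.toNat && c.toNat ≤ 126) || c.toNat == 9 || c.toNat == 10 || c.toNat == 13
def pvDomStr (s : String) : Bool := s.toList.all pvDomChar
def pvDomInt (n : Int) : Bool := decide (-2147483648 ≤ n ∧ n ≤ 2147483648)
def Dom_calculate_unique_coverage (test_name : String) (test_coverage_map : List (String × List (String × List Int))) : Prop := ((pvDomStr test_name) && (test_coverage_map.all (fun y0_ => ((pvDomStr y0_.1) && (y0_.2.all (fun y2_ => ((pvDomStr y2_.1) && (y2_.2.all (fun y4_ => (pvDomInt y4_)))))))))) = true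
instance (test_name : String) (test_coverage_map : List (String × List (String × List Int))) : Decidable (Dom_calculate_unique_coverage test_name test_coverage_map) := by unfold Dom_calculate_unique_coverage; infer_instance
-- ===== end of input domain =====

-- B replaces A's two accumulated key sets and set difference by one coverage-frequency dict
-- built in a single pass, then counts this test's lines with frequency 1 (idiomatic; same cost).


-- ===== PORT A =====
-- the f-string key f"{file_path}:{line_num}", modelled as its character list
def pvKey (f : String) (l : Int) : List Char := f.toList ++ ':' :: PySem.Int.toChars l

def calculate_unique_coverage (test_name : String) (test_coverage_map : List (String × List (String × List Int))) : Int :=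
  match (PySem.Dict.mk test_coverage_map).get? test_name with
  | none => 0
  | some test_coverage =>
    let test_lines : PySem.Set (List Char) :=
      test_coverage.foldl (fun s fl =>
        fl.2.foldl (fun s ln => PySem.Set.add s (pvKey fl.1 ln)) s) PySem.Set.empty
    let other_lines : PySem.Set (List Char) :=
      test_coverage_map.foldl (fun s e =>
        if e.1 ≠ test_name then
          e.2.foldl (fun s fl =>
            fl.2.foldl (fun s ln => PySem.Set.add s (pvKey fl.1 ln)) s) s
        else s) PySem.Set.empty
    PySem.Set.len (PySem.Set.diff test_lines other_lines)

-- ===== PORT B =====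
def calculate_unique_coverage_alt (test_name : String) (test_coverage_map : List (String × List (String × List Int))) : Int :=
  match (PySem.Dict.mk test_coverage_map).get? test_name with
  | none => 0
  | some test_coverage =>
    let counts : PySem.Dict (List Char) Int :=
      test_coverage_map.foldl (fun d e =>
        e.2.foldl (fun d fl =>
          fl.2.foldl (fun d ln =>
            d.insert (pvKey fl.1 ln) (d.getD (pvKey fl.1 ln) 0 + 1)) d) d) PySem.Dict.empty
    test_coverage.foldl (fun acc fl =>
      fl.2.foldl (fun acc ln =>
        if counts.getD (pvKey fl.1 ln) 0 = 1 then acc + 1 else acc) acc) 0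

-- ===== PRECONDITION & SPEC =====
-- Pre_ restricts the association-list encoding to what Python dict/set arguments can actually be:
-- no duplicate test names, no duplicate file paths within a test, no duplicate line numbers within a set.
def Pre_calculate_unique_coverage (test_name : String) (test_coverage_map : List (String × List (String × List Int))) : Prop :=
  (test_coverage_map.map Prod.fst).Nodup ∧
    ∀ e ∈ test_coverage_map, ((e.2.map Prod.fst).Nodup ∧ ∀ fl ∈ e.2, fl.2.Nodup)
instance (test_name : String) (test_coverage_map : List (String × List (String × List Int))) : Decidable (Pre_calculate_unique_coverage test_name test_coverage_map) := by unfold Pre_calculate_unique_coverage; infer_instance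

def pvWitness_calculate_unique_coverage : String × (List (String × List (String × List Int))) :=
  ("t1", [("t1", [("f.py", [1, 2])]), ("t2", [("f.py", [2, 3])])])

def Spec_calculate_unique_coverage (test_name : String) (test_coverage_map : List (String × List (String × List Int))) (out : Int) : Prop := out = calculate_unique_coverage_alt test_name test_coverage_map
instance (test_name : String) (test_coverage_map : List (String × List (String × List Int))) (out : Int) : Decidable (Spec_calculate_unique_coverage test_name test_coverage_map out) := by unfold Spec_calculate_unique_coverage; infer_instance

-- ===== CLAIM (what is proved, stated in full; the proofs are below) =====
def Claim_equal_calculate_unique_coverage : Prop := ∀ (test_name : String) (test_coverage_map : List (String × List (String × List Int))), Dom_calculate_unique_coverage test_name test_coverage_map → Pre_calculate_unique_coverage test_name test_coverage_map → Spec_calculate_unique_coverage test_name test_coverage_map (calculate_unique_coverage test_name test_coverage_map)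

-- ===== LEMMAS AND PROOFS =====

-- the multiset of keys one test's coverage dict generates, and the flattened variants
def pvKeysOfCov (c : List (String × List Int)) : List (List Char) :=
  c.flatMap (fun fl => fl.2.map (fun ln => pvKey fl.1 ln))

def pvAllKeys (m : List (String × List (String × List Int))) : List (List Char) :=
  m.flatMap (fun e => pvKeysOfCov e.2)

def pvOtherKeys (tn : String) (m : List (String × List (String × List Int))) : List (List Char) :=
  (m.filter (fun e => e.1 ≠ tn)).flatMap (fun e => pvKeysOfCov e.2)

-- str(n) never contains ':' and is injective
theorem pv_toDigitsCore_eq (f : Nat) : ∀ (n : Nat) (acc : List Char), 0 < n → n ≤ f →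
    Nat.toDigitsCore 10 f n acc = ((Nat.digits 10 n).map Nat.digitChar).reverse ++ acc := by
  induction f with
  | zero => intro n acc h0 hf; omega
  | succ f ih =>
    intro n acc h0 hf
    rw [Nat.digits_def' (by norm_num) h0]
    by_cases h : n / 10 = 0
    · simp [Nat.toDigitsCore, h, List.reverse_cons]
    · have hlt : n / 10 ≤ f := by
        have : n / 10 < n := Nat.div_lt_self h0 (by norm_num)
        omega
      simp only [Nat.toDigitsCore, h, if_false]
      rw [ih (n / 10) _ (Nat.pos_of_ne_zero h) hlt]
      simp

theorem pv_toDigits10 (n : Nat) :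
    Nat.toDigits 10 n = if n = 0 then ['0'] else ((Nat.digits 10 n).map Nat.digitChar).reverse := by
  by_cases h : n = 0
  · subst h; simp [Nat.toDigits, Nat.toDigitsCore]; decide
  · simp only [h, if_false, Nat.toDigits]
    simpa using pv_toDigitsCore_eq (n + 1) n [] (Nat.pos_of_ne_zero h) (by omega)

-- decoding str(n) back to n, which gives injectivity
def pvVal (cs : List Char) : Nat := cs.foldl (fun a c => 10 * a + (c.toNat - 48)) 0

theorem pv_digitChar_toNat {d : Nat} (hd : d < 10) : (Nat.digitChar d).toNat = d + 48 := by
  interval_cases d <;> decide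

theorem pv_foldr_digits (l : List Nat) (h : ∀ d ∈ l, d < 10) :
    l.foldr (fun d a => 10 * a + ((Nat.digitChar d).toNat - 48)) 0 = Nat.ofDigits 10 l := by
  induction l with
  | nil => simp [Nat.ofDigits]
  | cons d rest ih =>
    simp only [List.foldr_cons, Nat.ofDigits_cons,
      ih (fun x hx => h x (List.mem_cons_of_mem _ hx))]
    rw [pv_digitChar_toNat (h d List.mem_cons_self)]
    omega

theorem pv_val_toDigits (n : Nat) : pvVal (Nat.toDigits 10 n) = n := by
  rw [pv_toDigits10]
  split_ifs with h
  · subst h; decide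
  · rw [pvVal, List.foldl_reverse, List.foldr_map,
      pv_foldr_digits _ (fun d hd => Nat.digits_lt_base (by norm_num) hd)]
    exact Nat.ofDigits_digits 10 n

theorem pv_toDigits10_inj {m n : Nat} (h : Nat.toDigits 10 m = Nat.toDigits 10 n) : m = n := by
  have := congrArg pvVal h
  rwa [pv_val_toDigits, pv_val_toDigits] at this

theorem pv_colon_not_mem_toDigits (n : Nat) : ':' ∉ Nat.toDigits 10 n := by
  intro h
  have := Nat.isDigit_of_mem_toDigits (b := 10) (by norm_num) (by norm_num) h
  exact absurd this (by decide)

theorem pv_colon_not_mem_toChars (n : Int) : ':' ∉ PySem.Int.toChars n := by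
  unfold PySem.Int.toChars
  split
  · intro h
    rcases List.mem_cons.mp h with h | h
    · exact absurd h (by decide)
    · exact pv_colon_not_mem_toDigits _ h
  · exact pv_colon_not_mem_toDigits _

theorem pv_toChars_inj {m n : Int} (h : PySem.Int.toChars m = PySem.Int.toChars n) : m = n := by
  unfold PySem.Int.toChars at h
  split_ifs at h with hm hn hn
  · simp only [List.cons.injEq] at h
    have := pv_toDigits10_inj h.2
    omega
  · exfalso
    have : '-' ∈ Nat.toDigits 10 n.toNat := by rw [← h]; exact List.mem_cons_self
    have := Nat.isDigit_of_mem_toDigits (b := 10) (by norm_num) (by norm_num) this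
    exact absurd this (by decide)
  · exfalso
    have : '-' ∈ Nat.toDigits 10 m.toNat := by rw [h]; exact List.mem_cons_self
    have := Nat.isDigit_of_mem_toDigits (b := 10) (by norm_num) (by norm_num) this
    exact absurd this (by decide)
  · have := pv_toDigits10_inj h
    omega

theorem pv_sep_inj : ∀ (a b t1 t2 : List Char), ':' ∉ t1 → ':' ∉ t2 →
    a ++ ':' :: t1 = b ++ ':' :: t2 → a = b ∧ t1 = t2 := by
  intro a
  induction a with
  | nil =>
    intro b t1 t2 h1 h2 h
    cases b with
    | nil => simpa using h
    | cons c bs =>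
      exfalso
      simp only [List.nil_append, List.cons_append, List.cons.injEq] at h
      exact h1 (h.2 ▸ List.mem_append_right bs (List.mem_cons_self))
  | cons c as ih =>
    intro b t1 t2 h1 h2 h
    cases b with
    | nil =>
      exfalso
      simp only [List.cons_append, List.nil_append, List.cons.injEq] at h
      exact h2 (h.2.symm ▸ List.mem_append_right as (List.mem_cons_self))
    | cons c' bs =>
      simp only [List.cons_append, List.cons.injEq] at h
      obtain ⟨h3, h4⟩ := ih bs t1 t2 h1 h2 h.2
      simp [h.1, h3, h4]

theorem pv_pvKey_inj {f1 f2 : String} {l1 l2 : Int} (h : pvKey f1 l1 = pvKey f2 l2) :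
    f1 = f2 ∧ l1 = l2 := by
  obtain ⟨h1, h2⟩ := pv_sep_inj _ _ _ _ (pv_colon_not_mem_toChars l1) (pv_colon_not_mem_toChars l2) h
  exact ⟨String.toList_injective h1, pv_toChars_inj h2⟩

-- loop shapes: the nested folds are folds over the flattened key lists
theorem pv_covFold (c : List (String × List Int)) (s : PySem.Set (List Char)) :
    c.foldl (fun s fl => fl.2.foldl (fun s ln => PySem.Set.add s (pvKey fl.1 ln)) s) s
      = PySem.Set.update s (pvKeysOfCov c) := by
  simp [PySem.Set.update, pvKeysOfCov, List.foldl_flatMap, List.foldl_map]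

theorem pv_otherFold (tn : String) :
    ∀ (m : List (String × List (String × List Int))) (s : PySem.Set (List Char)),
    m.foldl (fun s e =>
        if e.1 ≠ tn then
          e.2.foldl (fun s fl => fl.2.foldl (fun s ln => PySem.Set.add s (pvKey fl.1 ln)) s) s
        else s) s
      = PySem.Set.update s (pvOtherKeys tn m) := by
  intro m
  induction m with
  | nil => intro s; simp [pvOtherKeys, PySem.Set.update]
  | cons e rest ih =>
    intro s
    by_cases h : e.1 = tn
    · simp only [List.foldl_cons, h, ne_eq, not_true_eq_false, if_false]
      rw [ih]
      simp [pvOtherKeys, h]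
    · simp only [List.foldl_cons, ne_eq, h, not_false_eq_true, if_true]
      rw [pv_covFold, ih]
      simp [pvOtherKeys, h, PySem.Set.update, List.foldl_append]

theorem pv_countsFold (m : List (String × List (String × List Int))) :
    m.foldl (fun d e =>
        e.2.foldl (fun d fl =>
          fl.2.foldl (fun d ln =>
            d.insert (pvKey fl.1 ln) (d.getD (pvKey fl.1 ln) 0 + 1)) d) d) PySem.Dict.empty
      = PySem.Dict.counter (pvAllKeys m) := by
  rw [← PySem.Dict.foldl_insert_getD_add_one_eq_counter]
  simp [pvAllKeys, pvKeysOfCov, List.foldl_flatMap, List.foldl_map]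

theorem pv_sumFold (counts : PySem.Dict (List Char) Int) (tc : List (String × List Int)) :
    tc.foldl (fun acc fl =>
        fl.2.foldl (fun acc ln =>
          if counts.getD (pvKey fl.1 ln) 0 = 1 then acc + 1 else acc) acc) (0 : Int)
      = ((pvKeysOfCov tc).countP (fun k => decide (counts.getD k 0 = 1)) : Int) := by
  have h := PySem.List.foldl_ite_add_one (fun k => counts.getD k 0 = 1) (pvKeysOfCov tc) 0
  rw [zero_add] at h
  rw [← h, pvKeysOfCov, List.foldl_flatMap]
  simp [List.foldl_map]

theorem pv_update_nodup : ∀ (xs : List (List Char)) (s : PySem.Set (List Char)),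
    xs.Nodup → (∀ x ∈ xs, x ∉ s) → PySem.Set.update s xs = s ++ xs := by
  intro xs
  induction xs with
  | nil => intro s _ _; simp [PySem.Set.update]
  | cons x rest ih =>
    intro s hn hd
    have hadd : PySem.Set.add s x = s ++ [x] := by
      simp [PySem.Set.add, PySem.Set.contains]
      intro hc
      exact absurd (by simpa using hc) (hd x (by simp))
    simp only [PySem.Set.update, List.foldl_cons] at *
    rw [hadd, ih (s ++ [x]) (by simp_all [List.nodup_cons]) ?_]
    · simp
    · intro y hy
      simp only [List.mem_append, List.mem_singleton]
      rintro (h | rfl)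
      · exact hd y (by simp [hy]) h
      · exact (List.nodup_cons.mp hn).1 hy

theorem pv_ofList_nodup {xs : List (List Char)} (h : xs.Nodup) : PySem.Set.ofList xs = xs := by
  have := pv_update_nodup xs PySem.Set.empty h (by simp [PySem.Set.empty])
  simpa [PySem.Set.ofList, PySem.Set.update, PySem.Set.empty] using this

theorem pv_mem_keysOfCov {k : List Char} {c : List (String × List Int)} :
    k ∈ pvKeysOfCov c ↔ ∃ fl ∈ c, ∃ ln ∈ fl.2, k = pvKey fl.1 ln := by
  simp [pvKeysOfCov, eq_comm]

theorem pv_nodup_keysOfCov : ∀ (c : List (String × List Int)),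
    (c.map Prod.fst).Nodup → (∀ fl ∈ c, fl.2.Nodup) → (pvKeysOfCov c).Nodup := by
  intro c
  induction c with
  | nil => intro _ _; simp [pvKeysOfCov]
  | cons fl rest ih =>
    intro h1 h2
    simp only [List.map_cons, List.nodup_cons] at h1
    have hrest : (pvKeysOfCov rest).Nodup := ih h1.2 (fun x hx => h2 x (by simp [hx]))
    have hhead : (fl.2.map (fun ln => pvKey fl.1 ln)).Nodup := by
      apply List.Nodup.map ?_ (h2 fl (by simp))
      intro a b hab
      exact (pv_pvKey_inj hab).2
    have : pvKeysOfCov (fl :: rest) = fl.2.map (fun ln => pvKey fl.1 ln) ++ pvKeysOfCov rest := by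
      simp [pvKeysOfCov]
    rw [this]
    apply List.Nodup.append hhead hrest
    intro k hk1 hk2
    obtain ⟨ln, _, hln⟩ := List.mem_map.mp hk1
    obtain ⟨fl', hfl', ln', _, hln'⟩ := pv_mem_keysOfCov.mp hk2
    have : fl.1 = fl'.1 := (pv_pvKey_inj (hln.symm ▸ hln' : pvKey fl.1 ln = pvKey fl'.1 ln')).1
    exact h1.1 (this ▸ List.mem_map_of_mem hfl')

theorem pv_perm (tn : String) (tc : List (String × List Int)) :
    ∀ (m : List (String × List (String × List Int))),
    (PySem.Dict.mk m).get? tn = some tc → (m.map Prod.fst).Nodup →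
    (pvAllKeys m).Perm (pvKeysOfCov tc ++ pvOtherKeys tn m) := by
  intro m
  induction m with
  | nil => intro h _; simp [PySem.Dict.get?] at h
  | cons e rest ih =>
    intro hget hn
    simp only [List.map_cons, List.nodup_cons] at hn
    by_cases h : e.1 = tn
    · have : tc = e.2 := by
        rw [show (e : String × List (String × List Int)) = (e.1, e.2) from rfl] at hget
        rw [PySem.Dict.get?_mk_cons] at hget
        simp [h] at hget
        exact hget.symm
      subst this
      have hfil : rest.filter (fun e' => !decide (e'.1 = tn)) = rest := by
        apply List.filter_eq_self.mpr
        intro e' he'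
        simp only [Bool.not_eq_eq_eq_not, Bool.not_true, decide_eq_false_iff_not]
        intro heq
        apply hn.1
        rw [h, ← heq]
        exact List.mem_map.mpr ⟨e', he', rfl⟩
      have hok : pvOtherKeys tn (e :: rest) = pvAllKeys rest := by
        simp only [pvOtherKeys, pvAllKeys, List.filter_cons]
        simp [h, hfil]
      rw [hok]
      simp [pvAllKeys]
    · have hget' : (PySem.Dict.mk rest).get? tn = some tc := by
        rw [show (e : String × List (String × List Int)) = (e.1, e.2) from rfl] at hget
        rw [PySem.Dict.get?_mk_cons] at hget
        simpa [h] using hget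
      have hperm := ih hget' hn.2
      have hother : pvOtherKeys tn (e :: rest) = pvKeysOfCov e.2 ++ pvOtherKeys tn rest := by
        simp [pvOtherKeys, h]
      have hall : pvAllKeys (e :: rest) = pvKeysOfCov e.2 ++ pvAllKeys rest := by
        simp [pvAllKeys]
      rw [hall, hother]
      refine (hperm.append_left _).trans ?_
      rw [← List.append_assoc, ← List.append_assoc]
      exact List.perm_append_comm.append_right _

-- ===== VERDICT (by name: the statement is the Claim_ definition above) =====
theorem calculate_unique_coverage_spec : Claim_equal_calculate_unique_coverage := by
  intro tn m _ hpre
  unfold Spec_calculate_unique_coverage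
  unfold calculate_unique_coverage calculate_unique_coverage_alt
  obtain ⟨hnodup, hinner⟩ := hpre
  cases hget : (PySem.Dict.mk m).get? tn with
  | none => rfl
  | some tc =>
    simp only
    rw [pv_covFold, pv_otherFold, pv_countsFold, pv_sumFold]
    -- tc is an entry of m, so its inner nodup facts apply
    have htc : (tn, tc) ∈ m := PySem.Dict.mem_items_of_get?_eq_some _ hget
    have hK : (pvKeysOfCov tc).Nodup := by
      obtain ⟨h1, h2⟩ := hinner (tn, tc) htc
      exact pv_nodup_keysOfCov tc h1 h2
    have hperm := pv_perm tn tc m hget hnodup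
    rw [show PySem.Set.update PySem.Set.empty (pvKeysOfCov tc) = PySem.Set.ofList (pvKeysOfCov tc) from rfl]
    rw [show PySem.Set.update PySem.Set.empty (pvOtherKeys tn m) = PySem.Set.ofList (pvOtherKeys tn m) from rfl]
    rw [pv_ofList_nodup hK]
    rw [PySem.Set.diff, PySem.Set.len]
    rw [← List.countP_eq_length_filter]
    congr 1
    apply List.countP_congr
    intro k hk
    have hcnt : (PySem.Dict.counter (pvAllKeys m)).getD k 0 = ((pvAllKeys m).count k : Int) :=
      PySem.Dict.getD_counter _ _
    have hcount : (pvAllKeys m).count k = (pvKeysOfCov tc).count k + (pvOtherKeys tn m).count k := by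
      rw [hperm.count_eq, List.count_append]
    have hone : (pvKeysOfCov tc).count k = 1 := by
      have hle := List.nodup_iff_count_le_one.mp hK k
      have hpos := List.count_pos_iff.mpr hk
      omega
    constructor
    · intro hcontains
      simp only [Bool.not_eq_true', PySem.Set.contains, List.contains_eq_mem, decide_eq_false_iff_not] at hcontains
      have hnotin : k ∉ pvOtherKeys tn m := by
        intro hmem
        exact hcontains ((PySem.Set.mem_ofList _ _).mpr hmem)
      have : (pvOtherKeys tn m).count k = 0 := List.count_eq_zero.mpr hnotin
      simp only [decide_eq_true_eq]
      rw [hcnt, hcount, hone, this]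
      norm_num
    · intro hone'
      simp only [decide_eq_true_eq] at hone'
      rw [hcnt, hcount, hone] at hone'
      have : (pvOtherKeys tn m).count k = 0 := by omega
      simp only [Bool.not_eq_true', PySem.Set.contains, List.contains_eq_mem, decide_eq_false_iff_not]
      intro hmem
      have := List.count_eq_zero.mp this ((PySem.Set.mem_ofList _ _).mp hmem)
      exact this
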